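-- pv_equiv track=rewrite | github.com/Bpig-C/multimodal-excel-system | backend/services/offset_correction.py | _map_position_with_spaces
-- ===== SOURCE A (Python) =====
-- from typing import Tuple, Optional, List, Dict
--
-- def _map_position_with_spaces(
--
--     text: str,
--     pos_no_space: int,
--     length_no_space: int
-- ) -> Optional[Tuple[int, int]]:
--     """
--     将无空格文本的位置映射回原始文本位置
--
--     Args:
--         text: 原始文本
--         pos_no_space: 无空格文本中的位置
--         length_no_space: 无空格文本的长度
--
--     Returns:
--         (起始位置, 结束位置) 或 None
--     """
--     char_count = 0
--     start_pos = None
--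
--     for i, char in enumerate(text):
--         if char != ' ':
--             if char_count == pos_no_space:
--                 start_pos = i
--             char_count += 1
--
--             if start_pos is not None and char_count == pos_no_space + length_no_space:
--                 return start_pos, i + 1
--
--     return None
-- ===== SOURCE B (Python) =====
-- def _map_position_with_spaces(text, pos_no_space, length_no_space):
--     idx = [i for i, c in enumerate(text) if c != ' ']
--     if length_no_space >= 1 and 0 <= pos_no_space and pos_no_space + length_no_space - 1 < len(idx):
--         return idx[pos_no_space], idx[pos_no_space + length_no_space - 1] + 1
--     return None
-- ===== Notes on version B (the rewrite author's own statement) =====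
-- stated objective: simpler
-- what changed: Replaces the stateful single-pass counter with early return by a precomputed list of original indices of non-space characters followed by a range check and two direct lookups.
import Mathlib
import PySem

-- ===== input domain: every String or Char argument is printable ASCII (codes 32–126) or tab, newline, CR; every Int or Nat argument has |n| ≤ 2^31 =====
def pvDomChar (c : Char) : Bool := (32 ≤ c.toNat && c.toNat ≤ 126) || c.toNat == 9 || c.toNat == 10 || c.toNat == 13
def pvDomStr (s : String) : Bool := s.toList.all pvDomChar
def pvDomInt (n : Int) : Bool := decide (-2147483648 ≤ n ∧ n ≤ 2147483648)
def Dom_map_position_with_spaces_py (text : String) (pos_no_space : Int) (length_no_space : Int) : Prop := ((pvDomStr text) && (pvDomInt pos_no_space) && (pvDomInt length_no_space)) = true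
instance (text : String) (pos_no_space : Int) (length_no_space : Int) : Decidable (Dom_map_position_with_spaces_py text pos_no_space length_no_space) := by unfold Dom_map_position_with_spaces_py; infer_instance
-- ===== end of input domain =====

-- B replaces A's stateful counter-and-early-return scan by a precomputed index list with two direct lookups (simpler).
-- ===== PORT A =====
def goA (chars : List Char) (i : Int) (char_count : Int) (start_pos : Option Int)
    (pos_no_space : Int) (length_no_space : Int) : Option (Int × Int) :=
  match chars with
  | [] => none
  | c :: rest =>
    if c ≠ ' ' then
      let start_pos' := if char_count = pos_no_space then some i else start_pos
      let char_count' := char_count + 1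
      match start_pos' with
      | some s =>
        if char_count' = pos_no_space + length_no_space then some (s, i + 1)
        else goA rest (i + 1) char_count' start_pos' pos_no_space length_no_space
      | none => goA rest (i + 1) char_count' start_pos' pos_no_space length_no_space
    else goA rest (i + 1) char_count start_pos pos_no_space length_no_space

def map_position_with_spaces_py (text : String) (pos_no_space : Int) (length_no_space : Int) : Option (Int × Int) :=
  goA text.toList 0 0 none pos_no_space length_no_space

-- ===== PORT B =====
-- idx = [i for i, c in enumerate(text) if c != ' ']  (comprehension, built by recursion over the chars)
def nsIdx (chars : List Char) (i : Int) : List Int :=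
  match chars with
  | [] => []
  | c :: rest => if c ≠ ' ' then i :: nsIdx rest (i + 1) else nsIdx rest (i + 1)

def map_position_with_spaces_py_alt (text : String) (pos_no_space : Int) (length_no_space : Int) : Option (Int × Int) :=
  let idx := nsIdx text.toList 0
  if 1 ≤ length_no_space ∧ 0 ≤ pos_no_space ∧ pos_no_space + length_no_space - 1 < (idx.length : Int) then
    match PySem.List.pyGet? idx pos_no_space, PySem.List.pyGet? idx (pos_no_space + length_no_space - 1) with
    | some s, some e => some (s, e + 1)
    | _, _ => none
  else none

-- ===== PRECONDITION & SPEC =====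
def Spec_map_position_with_spaces_py (text : String) (pos_no_space : Int) (length_no_space : Int) (out : Option (Int × Int)) : Prop := out = map_position_with_spaces_py_alt text pos_no_space length_no_space
instance (text : String) (pos_no_space : Int) (length_no_space : Int) (out : Option (Int × Int)) : Decidable (Spec_map_position_with_spaces_py text pos_no_space length_no_space out) := by unfold Spec_map_position_with_spaces_py; infer_instance

-- ===== CLAIM (what is proved, stated in full; the proofs are below) =====
def Claim_equal_map_position_with_spaces_py : Prop := ∀ (text : String) (pos_no_space : Int) (length_no_space : Int), Dom_map_position_with_spaces_py text pos_no_space length_no_space → Spec_map_position_with_spaces_py text pos_no_space length_no_space (map_position_with_spaces_py text pos_no_space length_no_space)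

-- ===== LEMMAS AND PROOFS =====

theorem pyGet?_cons_succ_int (x : Int) (xs : List Int) (k : Int) (hk : 0 ≤ k) :
    PySem.List.pyGet? (x :: xs) (k + 1) = PySem.List.pyGet? xs k := by
  rw [PySem.List.pyGet?_of_nonneg _ (by omega : (0:Int) ≤ k + 1),
      PySem.List.pyGet?_of_nonneg _ hk]
  have : (k + 1).toNat = k.toNat + 1 := by omega
  rw [this]
  rfl

theorem pyGet?_isSome_iff (xs : List Int) (k : Int) (hk : 0 ≤ k) :
    (PySem.List.pyGet? xs k).isSome ↔ k < (xs.length : Int) := by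
  rw [PySem.List.pyGet?_of_nonneg _ hk]
  simp only [Option.isSome_iff_exists, List.getElem?_eq_some_iff]
  constructor
  · rintro ⟨a, h, -⟩; omega
  · intro h; exact ⟨xs[k.toNat]'(by omega), by omega, rfl⟩

theorem goA_none_of_len_nonpos (chars : List Char) (i c : Int) (sp : Option Int)
    (pos len : Int) (hlen : len ≤ 0) (hsp : ∀ s, sp = some s → pos < c) :
    goA chars i c sp pos len = none := by
  induction chars generalizing i c sp with
  | nil => rfl
  | cons ch rest ih =>
    simp only [goA]
    split
    · by_cases hc : c = pos
      · subst hc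
        rw [if_pos rfl]
        dsimp only
        rw [if_neg (by omega)]
        exact ih _ _ _ (by intro s hs; omega)
      · rw [if_neg hc]
        cases hsp2 : sp with
        | none =>
          dsimp only
          exact ih _ _ _ (by intro s hs; simp at hs)
        | some s =>
          have := hsp s hsp2
          dsimp only
          rw [if_neg (by omega)]
          exact ih _ _ _ (by intro s' hs'; cases hs'; omega)
    · exact ih _ _ _ hsp

theorem goA_none_of_pos_neg (chars : List Char) (i c : Int)
    (pos len : Int) (hpos : pos < 0) (hc : 0 ≤ c) :
    goA chars i c none pos len = none := by
  induction chars generalizing i c with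
  | nil => rfl
  | cons ch rest ih =>
    simp only [goA]
    split
    · rw [if_neg (by omega)]
      dsimp only
      exact ih _ _ (by omega)
    · exact ih _ _ hc

theorem goA_some_spec (chars : List Char) (s pos len : Int) (i c : Int)
    (hlt : c < pos + len) (hgt : pos < c) :
    goA chars i c (some s) pos len =
      match PySem.List.pyGet? (nsIdx chars i) (pos + len - 1 - c) with
      | some e => some (s, e + 1)
      | none => none := by
  induction chars generalizing i c with
  | nil => simp [goA, nsIdx, PySem.List.pyGet?, PySem.List.pyIdx?]
  | cons ch rest ih =>
    simp only [goA, nsIdx]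
    split
    · rw [if_neg (by omega)]
      dsimp only
      by_cases hdone : c + 1 = pos + len
      · rw [if_pos hdone]
        have h0 : pos + len - 1 - c = 0 := by omega
        rw [h0, PySem.List.pyGet?_zero_cons]
      · rw [if_neg hdone]
        rw [ih _ _ (by omega) (by omega)]
        have h1 : pos + len - 1 - c = (pos + len - 1 - (c + 1)) + 1 := by omega
        rw [h1, pyGet?_cons_succ_int _ _ _ (by omega)]
    · exact ih _ _ hlt hgt

theorem goA_none_spec (chars : List Char) (pos len : Int) (hlen : 1 ≤ len)
    (i c : Int) (hc : c ≤ pos) :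
    goA chars i c none pos len =
      match PySem.List.pyGet? (nsIdx chars i) (pos - c),
            PySem.List.pyGet? (nsIdx chars i) (pos + len - 1 - c) with
      | some s, some e => some (s, e + 1)
      | _, _ => none := by
  induction chars generalizing i c with
  | nil => simp [goA, nsIdx, PySem.List.pyGet?, PySem.List.pyIdx?]
  | cons ch rest ih =>
    simp only [goA, nsIdx]
    split
    · by_cases hcp : c = pos
      · subst hcp
        rw [if_pos rfl]
        dsimp only
        rw [show c - c = (0:Int) by omega, PySem.List.pyGet?_zero_cons]
        by_cases h1 : len = 1
        · subst h1
          rw [if_pos rfl]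
          rw [show c + 1 - 1 - c = (0:Int) by omega, PySem.List.pyGet?_zero_cons]
        · rw [if_neg (by omega)]
          rw [goA_some_spec _ _ _ _ _ _ (by omega) (by omega)]
          rw [show c + len - 1 - c = (c + len - 1 - (c + 1)) + 1 by omega,
              pyGet?_cons_succ_int _ _ _ (by omega)]
          cases PySem.List.pyGet? (nsIdx rest (i + 1)) (c + len - 1 - (c + 1)) <;> rfl
      · rw [if_neg hcp]
        dsimp only
        rw [ih _ _ (by omega)]
        rw [show pos - c = (pos - (c + 1)) + 1 by omega,
            show pos + len - 1 - c = (pos + len - 1 - (c + 1)) + 1 by omega,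
            pyGet?_cons_succ_int _ _ _ (by omega),
            pyGet?_cons_succ_int _ _ _ (by omega)]
    · exact ih _ _ hc

-- ===== VERDICT (by name: the statement is the Claim_ definition above) =====
theorem map_position_with_spaces_py_spec : Claim_equal_map_position_with_spaces_py := by
  intro text pos len _
  unfold Spec_map_position_with_spaces_py map_position_with_spaces_py map_position_with_spaces_py_alt
  by_cases hlen : 1 ≤ len
  · by_cases hpos : 0 ≤ pos
    · rw [goA_none_spec _ _ _ hlen _ _ (by omega)]
      simp only [Int.sub_zero]
      by_cases hin : pos + len - 1 < ((nsIdx text.toList 0).length : Int)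
      · rw [if_pos ⟨hlen, hpos, hin⟩]
      · rw [if_neg (by tauto)]
        have hnone : PySem.List.pyGet? (nsIdx text.toList 0) (pos + len - 1) = none := by
          rw [← Option.not_isSome_iff_eq_none]
          rw [pyGet?_isSome_iff _ _ (by omega)]
          omega
        rw [hnone]
        cases PySem.List.pyGet? (nsIdx text.toList 0) pos <;> rfl
    · rw [goA_none_of_pos_neg _ _ _ _ _ (by omega) le_rfl, if_neg (by omega)]
  · rw [goA_none_of_len_nonpos _ _ _ _ _ _ (by omega) (by intro s h; simp at h),
        if_neg (by omega)]
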